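-- pv_equiv track=rewrite | github.com/vadymshturkhal/concrete-math | slice_plain.py | slice_plane_dynamic
-- ===== SOURCE A (Python) =====
-- def slice_plane_dynamic(lines=1):
--     if lines < 0:
--         return 1
--
--     slices = [1, 2]
--
--     for i in range(2, lines + 1):
--         planes = i + slices[i - 1]
--         slices.append(planes)
--
--     return slices[lines]
-- ===== SOURCE B (Python) =====
-- def slice_plane_dynamic(lines=1):
--     if lines < 0:
--         return 1
--     return 1 + lines * (lines + 1) // 2
-- ===== Notes on version B (the rewrite author's own statement) =====
-- stated objective: faster
-- what changed: Replaces the O(n) dynamic-programming table of all intermediate region counts with the lazy-caterer closed form 1 + n(n+1)//2 evaluated in O(1).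
import Mathlib
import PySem

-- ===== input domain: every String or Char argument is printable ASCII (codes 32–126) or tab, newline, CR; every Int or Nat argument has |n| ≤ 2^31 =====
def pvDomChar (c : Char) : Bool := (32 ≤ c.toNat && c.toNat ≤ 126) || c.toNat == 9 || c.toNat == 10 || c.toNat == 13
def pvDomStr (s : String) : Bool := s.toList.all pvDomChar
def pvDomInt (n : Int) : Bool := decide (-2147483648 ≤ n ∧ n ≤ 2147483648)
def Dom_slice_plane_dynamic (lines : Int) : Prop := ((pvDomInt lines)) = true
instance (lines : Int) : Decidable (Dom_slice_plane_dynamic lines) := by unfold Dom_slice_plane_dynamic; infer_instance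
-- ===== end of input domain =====

-- B replaces A's O(n) table of intermediate region counts with the O(1) closed form 1 + n(n+1)//2.

-- ===== PORT A =====
-- loop body: planes = i + slices[i - 1]; slices.append(planes)
-- (the index i - 1 is always in range in Python, so pyGetD with default 0 is exact here)
def pvStepA (slices : List Int) (i : Int) : List Int :=
  slices ++ [i + PySem.List.pyGetD slices (i - 1) 0]

def slice_plane_dynamic (lines : Int) : Int :=
  if lines < 0 then 1
  else
    let slices := (PySem.List.pyRange 2 (lines + 1) 1).foldl pvStepA [1, 2]
    -- slices[lines] is always in range in Python, so pyGetD with default 0 is exact here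
    PySem.List.pyGetD slices lines 0

-- ===== PORT B =====
def slice_plane_dynamic_alt (lines : Int) : Int :=
  if lines < 0 then 1 else 1 + PySem.Int.floordiv (lines * (lines + 1)) 2

-- ===== PRECONDITION & SPEC =====
def Spec_slice_plane_dynamic (lines : Int) (out : Int) : Prop := out = slice_plane_dynamic_alt lines
instance (lines : Int) (out : Int) : Decidable (Spec_slice_plane_dynamic lines out) := by unfold Spec_slice_plane_dynamic; infer_instance

-- ===== CLAIM (what is proved, stated in full; the proofs are below) =====
def Claim_equal_slice_plane_dynamic : Prop := ∀ (lines : Int), Dom_slice_plane_dynamic lines → Spec_slice_plane_dynamic lines (slice_plane_dynamic lines)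

-- ===== LEMMAS AND PROOFS =====

-- the triangular value A's table holds at index n
def pvTri (n : Nat) : Int := 1 + ((n * (n + 1) / 2 : Nat) : Int)

lemma pvTri_succ (n : Nat) : pvTri (n + 1) = ((n : Int) + 1) + pvTri n := by
  unfold pvTri
  have hdvd : 2 ∣ n * (n + 1) := (Nat.even_mul_succ_self n).two_dvd
  obtain ⟨k, hk⟩ := hdvd
  have h2 : (n + 1) * (n + 2) = 2 * (k + (n + 1)) := by nlinarith
  rw [h2, hk, Nat.mul_div_cancel_left _ (by norm_num), Nat.mul_div_cancel_left _ (by norm_num)]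
  push_cast
  ring

lemma pvLoop_spec (n : Nat) : ∃ pre : List Int,
    (PySem.List.pyRange 2 (((n + 1 : Nat) : Int) + 1) 1).foldl pvStepA [1, 2]
      = pre ++ [pvTri (n + 1)] ∧ pre.length = n + 1 := by
  induction n with
  | zero =>
      refine ⟨[1], ?_, rfl⟩
      have h : PySem.List.pyRange 2 (((1 : Nat) : Int) + 1) 1 = [] := by
        apply PySem.List.pyRange_one_eq_nil; norm_num
      rw [h]
      simp [List.foldl, pvTri]
  | succ m ih =>
      obtain ⟨pre, hL, hlen⟩ := ih
      have hsplit : PySem.List.pyRange 2 (((m + 2 : Nat) : Int) + 1) 1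
          = PySem.List.pyRange 2 (((m + 1 : Nat) : Int) + 1) 1 ++ [((m + 1 : Nat) : Int) + 1] := by
        have h := PySem.List.pyRange_one_succ_right (a := 2) (b := ((m + 1 : Nat) : Int) + 1)
          (by push_cast; omega)
        rw [← h]
        congr 1
      refine ⟨pre ++ [pvTri (m + 1)], ?_, by simp [hlen]⟩
      rw [hsplit, List.foldl_append, hL]
      simp only [List.foldl, pvStepA]
      have hidx : (((m + 1 : Nat) : Int) + 1) - 1 = ((pre.length : Nat) : Int) := by
        rw [hlen]; push_cast; ring
      have hget : PySem.List.pyGetD (pre ++ [pvTri (m + 1)]) ((((m + 1 : Nat) : Int) + 1) - 1) 0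
          = pvTri (m + 1) := by
        rw [hidx, PySem.List.pyGetD_natCast]
        simp [List.getD]
      rw [hget]
      have hval : (((m + 1 : Nat) : Int) + 1) + pvTri (m + 1) = pvTri (m + 2) := by
        rw [pvTri_succ (m + 1)]
      rw [hval]

lemma pvAlt_tri (n : Nat) : slice_plane_dynamic_alt (n : Int) = pvTri n := by
  unfold slice_plane_dynamic_alt pvTri
  rw [if_neg (by omega)]
  have h : ((n : Int) * ((n : Int) + 1)) = ((n * (n + 1) : Nat) : Int) := by push_cast; ring
  rw [h]
  have h2 := PySem.Int.floordiv_natCast (n * (n + 1)) 2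
  exact_mod_cast congrArg (1 + ·) h2

theorem pv_main (lines : Int) : slice_plane_dynamic lines = slice_plane_dynamic_alt lines := by
  by_cases hneg : lines < 0
  · simp [slice_plane_dynamic, slice_plane_dynamic_alt, hneg]
  · rw [not_lt] at hneg
    lift lines to Nat using hneg with n
    rw [pvAlt_tri]
    unfold slice_plane_dynamic
    rw [if_neg (by omega)]
    match n with
    | 0 =>
        have h : PySem.List.pyRange 2 (((0 : Nat) : Int) + 1) 1 = [] := by
          apply PySem.List.pyRange_one_eq_nil; norm_num
        rw [h]
        simp [List.foldl, pvTri]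
    | Nat.succ m =>
        obtain ⟨pre, hL, hlen⟩ := pvLoop_spec m
        rw [hL]
        have hidx : ((m + 1 : Nat) : Int) = ((pre.length : Nat) : Int) := by rw [hlen]
        rw [hidx, PySem.List.pyGetD_natCast]
        simp [List.getD]

-- ===== VERDICT (by name: the statement is the Claim_ definition above) =====
theorem slice_plane_dynamic_spec : Claim_equal_slice_plane_dynamic := by
  intro lines _
  exact pv_main lines
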